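-- pv_equiv track=rewrite | github.com/HanSeongDeok/before-dinner-algorithm | programmers/han/week12/week12 - 두 개 뽑아서 더하기.py | combination_custom
-- ===== SOURCE A (Python) =====
-- def combination_custom(numbers, c):
--     arr = []
--     def combination(temp_arr, start):
--         if len(temp_arr) == c:
--             arr.append(sum(temp_arr))
--             return
--
--         for i in range(start, len(numbers)):
--             temp_arr.append(numbers[i])
--             combination(temp_arr, i+1)
--             temp_arr.pop()
--
--     combination([], 0)
--     return arr
-- ===== SOURCE B (Python) =====
-- def combination_custom(numbers, c):
--     # Head recursion on the list structure: sums of k-combinations of lst,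
--     # in the same lexicographic order, built arithmetically (no temp list).
--     if c < 0:
--         return []
--     def sums(lst, k):
--         if k == 0:
--             return [0]
--         if not lst:
--             return []
--         x, rest = lst[0], lst[1:]
--         return [x + s for s in sums(rest, k - 1)] + sums(rest, k)
--     return sums(numbers, c)
-- ===== Notes on version B (the rewrite author's own statement) =====
-- stated objective: alternative
-- what changed: Replaces the index-based backtracking with a shared temp_arr (append/recurse/pop, summing the buffer at each leaf) by a pure head-recursion on the list that returns the combination sums directly, adding the head element arithmetically to the sums of the tail's (k-1)-combinations.
import Mathlib
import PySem

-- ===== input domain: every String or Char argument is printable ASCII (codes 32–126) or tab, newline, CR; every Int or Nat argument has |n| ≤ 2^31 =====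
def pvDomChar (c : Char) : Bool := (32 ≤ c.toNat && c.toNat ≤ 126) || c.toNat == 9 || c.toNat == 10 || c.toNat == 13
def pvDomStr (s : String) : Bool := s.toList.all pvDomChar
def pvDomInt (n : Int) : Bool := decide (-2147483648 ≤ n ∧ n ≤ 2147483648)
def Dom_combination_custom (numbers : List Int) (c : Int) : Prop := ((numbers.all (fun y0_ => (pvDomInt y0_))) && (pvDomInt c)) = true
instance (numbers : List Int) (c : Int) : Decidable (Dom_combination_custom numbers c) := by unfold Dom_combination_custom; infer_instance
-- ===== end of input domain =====

-- B replaces A's index-backtracking with a shared temp buffer by a pure head-recursion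
-- returning the combination sums directly (objective: alternative); same return values.

-- ===== PORT A =====
-- A's inner `combination(temp_arr, start)`: the `if len(temp_arr) == c` test (goA) and the
-- `for i in range(start, len(numbers))` loop with append/recurse/pop (loopA); the mutable
-- `arr` accumulator becomes the returned (appended) list.
mutual
def goA (numbers : List Int) (c : Int) (temp : List Int) (start : Nat) : List Int :=
  if (temp.length : Int) = c then [temp.sum]
  else loopA numbers c temp start
termination_by (numbers.length - start, 1)

def loopA (numbers : List Int) (c : Int) (temp : List Int) (start : Nat) : List Int :=
  if h : start < numbers.length then
    goA numbers c (temp ++ [numbers[start]]) (start + 1) ++ loopA numbers c temp (start + 1)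
  else []
termination_by (numbers.length - start, 0)
decreasing_by
  · exact Prod.Lex.left _ _ (by omega)
  · exact Prod.Lex.left _ _ (by omega)
end

def combination_custom (numbers : List Int) (c : Int) : List Int :=
  goA numbers c [] 0

-- ===== PORT B =====
-- B's `sums(lst, k)`
def sumsB (lst : List Int) (k : Int) : List Int :=
  if k = 0 then [0]
  else
    match lst with
    | [] => []
    | x :: rest => (sumsB rest (k - 1)).map (fun s => x + s) ++ sumsB rest k

def combination_custom_alt (numbers : List Int) (c : Int) : List Int :=
  if c < 0 then [] else sumsB numbers c

-- ===== PRECONDITION & SPEC =====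
def Spec_combination_custom (numbers : List Int) (c : Int) (out : List Int) : Prop := out = combination_custom_alt numbers c
instance (numbers : List Int) (c : Int) (out : List Int) : Decidable (Spec_combination_custom numbers c out) := by unfold Spec_combination_custom; infer_instance

-- ===== CLAIM (what is proved, stated in full; the proofs are below) =====
def Claim_equal_combination_custom : Prop := ∀ (numbers : List Int) (c : Int), Dom_combination_custom numbers c → Spec_combination_custom numbers c (combination_custom numbers c)

-- ===== LEMMAS AND PROOFS =====

lemma loopA_neg (numbers : List Int) (c : Int) (hc : c < 0) :
    ∀ f s temp, numbers.length - s ≤ f → loopA numbers c temp s = [] := by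
  intro f
  induction f with
  | zero =>
    intro s temp h
    rw [loopA]
    simp only [dif_neg (by omega : ¬ s < numbers.length)]
  | succ f ih =>
    intro s temp h
    rw [loopA]
    split
    · next hs =>
      rw [goA, if_neg (by simp; omega)]
      rw [ih (s+1) _ (by omega), ih (s+1) _ (by omega)]
      rfl
    · rfl

lemma loopA_neg' (numbers : List Int) (c : Int) (hc : c < 0) (s : Nat) (temp : List Int) :
    loopA numbers c temp s = [] :=
  loopA_neg numbers c hc (numbers.length - s) s temp le_rfl

lemma sumsB_zero (lst : List Int) : sumsB lst 0 = [0] := by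
  rw [sumsB.eq_def]; simp

lemma sumsB_nil (k : Int) (hk : k ≠ 0) : sumsB [] k = [] := by
  rw [sumsB.eq_def]; simp [hk]

lemma sumsB_cons (x : Int) (rest : List Int) (k : Int) (hk : k ≠ 0) :
    sumsB (x :: rest) k = (sumsB rest (k - 1)).map (fun s => x + s) ++ sumsB rest k := by
  rw [sumsB.eq_def]; simp [hk]

lemma loopA_eq (numbers : List Int) (c : Int) :
    ∀ f s temp, numbers.length - s ≤ f → (temp.length : Int) < c →
      loopA numbers c temp s
        = (sumsB (numbers.drop s) (c - temp.length)).map (fun v => temp.sum + v) := by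
  intro f
  induction f with
  | zero =>
    intro s temp h hlt
    rw [loopA, dif_neg (by omega : ¬ s < numbers.length)]
    rw [List.drop_eq_nil_of_le (by omega), sumsB_nil _ (by omega)]
    simp
  | succ f ih =>
    intro s temp h hlt
    rw [loopA]
    by_cases hs : s < numbers.length
    · rw [dif_pos hs]
      have hdrop : numbers.drop s = numbers[s] :: numbers.drop (s + 1) :=
        List.drop_eq_getElem_cons hs
      rw [hdrop, sumsB_cons _ _ _ (by omega)]
      have hloop := ih (s+1) temp (by omega) hlt
      rw [goA]
      by_cases heq : ((temp ++ [numbers[s]]).length : Int) = c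
      · rw [if_pos heq]
        have h0 : c - (temp.length : Int) - 1 = 0 := by simp at heq; omega
        have h1 : sumsB (numbers.drop (s+1)) (c - (temp.length : Int) - 1) = [0] := by
          rw [h0, sumsB_zero]
        rw [hloop, h1]
        simp [List.sum_append]
      · rw [if_neg heq]
        have hlt' : ((temp ++ [numbers[s]]).length : Int) < c := by
          simp at heq ⊢; omega
        have hgo := ih (s+1) (temp ++ [numbers[s]]) (by omega) hlt'
        rw [hgo, hloop]
        have hsub : c - ((temp.length : Int) + 1) = c - (temp.length : Int) - 1 := by ring
        simp only [List.length_append, List.length_cons, List.length_nil, Nat.cast_add,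
          Nat.cast_one, Nat.zero_add, List.sum_append, List.sum_cons,
          List.sum_nil, add_zero, List.map_map, List.map_append]
        rw [hsub]
        congr 1
        · simp [add_assoc]
    · rw [dif_neg hs]
      rw [List.drop_eq_nil_of_le (by omega), sumsB_nil _ (by omega)]
      simp

-- ===== VERDICT (by name: the statement is the Claim_ definition above) =====
theorem combination_custom_spec : Claim_equal_combination_custom := by
  intro numbers c _
  unfold Spec_combination_custom combination_custom combination_custom_alt
  rw [goA]
  by_cases hneg : c < 0
  · rw [if_neg (by simpa using (by omega : ¬ (0:Int) = c)), if_pos hneg]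
    exact loopA_neg' numbers c hneg 0 []
  · rw [if_neg hneg]
    by_cases h0 : c = 0
    · rw [if_pos (by simp [h0]), h0, sumsB_zero]
      simp
    · rw [if_neg (by simpa using fun h => h0 h.symm)]
      have := loopA_eq numbers c (numbers.length) 0 [] (by omega) (by simpa using by omega)
      simpa using this
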